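-- pv_equiv track=rewrite | github.com/mtrejo0/SchoolWork | 6.009/past/quiz2 April/q2_practice_solutions/q2_practice_a_sol.py | mix_tape
-- ===== SOURCE A (Python) =====
-- def mix_tape(songs, duration):
--     if duration == 0:
--         return []
--     if duration < 0:
--         return None
--     for song, dur in songs.items():
--         rec_result = mix_tape({k:v for k,v in songs.items() if k != song}, duration-dur)
--         if rec_result is not None:
--             return [song] + rec_result
--     return None
-- ===== SOURCE B (Python) =====
-- def _subset_sum(items, target):
--     # exact decision 'some subset of items sums to target', pruned by the window
--     # [sum of negative durations, sum of positive durations] of the remaining suffix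
--     def can(i, t, lo, hi):
--         if t == 0:
--             return True
--         if i == len(items):
--             return False
--         if t < lo or hi < t:
--             return False
--         d = items[i][1]
--         nlo = lo - d if d < 0 else lo
--         nhi = hi - d if d > 0 else hi
--         return can(i + 1, t - d, nlo, nhi) or can(i + 1, t, nlo, nhi)
--     lo = sum(v for _, v in items if v < 0)
--     hi = sum(v for _, v in items if v > 0)
--     return can(0, target, lo, hi)
--
-- def mix_tape(songs, duration):
--     if duration < 0:
--         return None
--     remaining = list(songs.items())
--     result = []
--     d = duration
--     while d != 0:
--         chosen = None
--         for idx, (name, dur) in enumerate(remaining):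
--             t = d - dur
--             if t >= 0 and _subset_sum(remaining[:idx] + remaining[idx + 1:], t):
--                 chosen = idx
--                 break
--         if chosen is None:
--             return None
--         name, dur = remaining.pop(chosen)
--         result.append(name)
--         d -= dur
--     return result
-- ===== Notes on version B (the rewrite author's own statement) =====
-- stated objective: alternative
-- what changed: A's exhaustive recursion over all orderings of the remaining songs is replaced by an iterative greedy loop that picks each next song via an exact window-pruned subset-sum feasibility decision; this is correct because a nonnegative remaining duration is reachable by A's search iff some subset of the remaining songs sums to it. Pre_ excludes association lists with duplicate keys, which denote no Python dict input (a dict collapses duplicate keys).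
import Mathlib
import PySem

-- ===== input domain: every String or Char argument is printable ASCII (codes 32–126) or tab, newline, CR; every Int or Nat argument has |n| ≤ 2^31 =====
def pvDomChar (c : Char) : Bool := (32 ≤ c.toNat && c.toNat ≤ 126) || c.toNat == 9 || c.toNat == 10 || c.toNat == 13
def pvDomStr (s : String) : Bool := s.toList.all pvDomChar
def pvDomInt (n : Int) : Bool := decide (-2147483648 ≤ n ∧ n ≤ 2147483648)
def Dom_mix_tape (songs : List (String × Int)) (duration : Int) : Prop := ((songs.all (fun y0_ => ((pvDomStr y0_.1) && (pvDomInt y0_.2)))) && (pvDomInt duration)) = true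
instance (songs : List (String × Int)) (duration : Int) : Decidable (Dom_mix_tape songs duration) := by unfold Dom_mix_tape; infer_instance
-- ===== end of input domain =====

-- B replaces A's exhaustive recursion over song orderings by an iterative greedy scan
-- whose per-candidate feasibility test is a window-pruned subset-sum decision (alternative
-- algorithm; return value proved identical on duplicate-key-free inputs).

-- ===== PORT A =====
-- {k:v for k,v in songs.items() if k != song}
def pyFilterNe (songs : List (String × Int)) (k : String) : List (String × Int) :=
  songs.filter (fun p => p.1 != k)

-- fuel-based totality guard: each recursive call strictly shrinks the dict, so
-- songs.length + 1 fuel always suffices (proved in the lemmas below).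
mutual
def mixA : Nat → List (String × Int) → Int → Option (List String)
  | 0, _, _ => none
  | f + 1, songs, d =>
    if d = 0 then some []
    else if d < 0 then none
    else tryA f songs songs d
termination_by f _ _ => (f, 0)

-- the 'for song, dur in songs.items():' loop; `pending` is the not-yet-tried tail
def tryA : Nat → List (String × Int) → List (String × Int) → Int → Option (List String)
  | _, _, [], _ => none
  | f, songs, x :: rest, d =>
    match mixA f (pyFilterNe songs x.1) (d - x.2) with
    | some r => some (x.1 :: r)
    | none => tryA f songs rest d
termination_by f _ pending _ => (f, pending.length + 1)
end

def mix_tape (songs : List (String × Int)) (duration : Int) : Option (List String) :=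
  mixA (songs.length + 1) songs duration

-- ===== PORT B =====
-- _subset_sum: sum(v for _, v in items if v < 0) / sum(v for _, v in items if v > 0)
def negSum (l : List (String × Int)) : Int := ((l.filter (fun p => p.2 < 0)).map Prod.snd).sum
def posSum (l : List (String × Int)) : Int := ((l.filter (fun p => 0 < p.2)).map Prod.snd).sum

-- the inner 'def can(i, t, lo, hi)' of _subset_sum; the Python recursion over the
-- suffix index i is ported as structural recursion over the suffix list items[i:]
def canSum : List (String × Int) → Int → Int → Int → Bool
  | items, t, lo, hi =>
    if t = 0 then true
    else match items with
      | [] => false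
      | p :: rest =>
        if t < lo ∨ hi < t then false
        else canSum rest (t - p.2) (if p.2 < 0 then lo - p.2 else lo)
               (if 0 < p.2 then hi - p.2 else hi)
             || canSum rest t (if p.2 < 0 then lo - p.2 else lo)
               (if 0 < p.2 then hi - p.2 else hi)

def subsetSum (items : List (String × Int)) (target : Int) : Bool :=
  canSum items target (negSum items) (posSum items)

-- the inner 'for idx, (name, dur) in enumerate(remaining):' search;
-- `before ++ after` is `remaining`, `before ++ rest` is remaining[:idx]+remaining[idx+1:]
def findChosen (d : Int) (before after : List (String × Int)) :
    Option (String × Int × List (String × Int)) :=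
  match after with
  | [] => none
  | x :: rest =>
    if 0 ≤ d - x.2 ∧ subsetSum (before ++ rest) (d - x.2) = true then
      some (x.1, x.2, before ++ rest)
    else findChosen d (before ++ [x]) rest

-- termination helper for mixLoop (cited by its decreasing_by)
theorem findChosen_length (d : Int) :
    ∀ (before after : List (String × Int)) nm du rest,
      findChosen d before after = some (nm, du, rest) →
      rest.length + 1 = before.length + after.length := by
  intro before after
  induction after generalizing before with
  | nil => intro nm du rest h; simp [findChosen] at h
  | cons x tl ih =>
    intro nm du rest h
    unfold findChosen at h
    split at h
    · simp at h
      obtain ⟨_, _, h3⟩ := h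
      subst h3; simp; omega
    · have := ih (before ++ [x]) nm du rest h
      simp at this ⊢; omega

-- the 'while d != 0:' loop with the result accumulator
def mixLoop (remaining : List (String × Int)) (d : Int) (acc : List String) :
    Option (List String) :=
  if d = 0 then some acc
  else
    match h : findChosen d [] remaining with
    | none => none
    | some (nm, du, rest) => mixLoop rest (d - du) (acc ++ [nm])
termination_by remaining.length
decreasing_by
  have := findChosen_length d [] remaining _ _ _ h
  simp at this; omega

def mix_tape_alt (songs : List (String × Int)) (duration : Int) : Option (List String) :=
  if duration < 0 then none else mixLoop songs duration []

-- ===== PRECONDITION & SPEC =====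
-- Pre_ excludes association lists with duplicate keys: the argument is a Python dict,
-- in which duplicate keys cannot occur (they collapse), so such lists denote no dict input.
def Pre_mix_tape (songs : List (String × Int)) (duration : Int) : Prop :=
  (songs.map Prod.fst).Nodup
instance (songs : List (String × Int)) (duration : Int) : Decidable (Pre_mix_tape songs duration) := by
  unfold Pre_mix_tape; infer_instance

def pvWitness_mix_tape : (List (String × Int)) × Int := ([("a", 1), ("b", 2), ("c", 4)], 3)

def Spec_mix_tape (songs : List (String × Int)) (duration : Int) (out : Option (List String)) : Prop := out = mix_tape_alt songs duration
instance (songs : List (String × Int)) (duration : Int) (out : Option (List String)) : Decidable (Spec_mix_tape songs duration out) := by unfold Spec_mix_tape; infer_instance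

-- ===== CLAIM (what is proved, stated in full; the proofs are below) =====
def Claim_equal_mix_tape : Prop := ∀ (songs : List (String × Int)) (duration : Int), Dom_mix_tape songs duration → Pre_mix_tape songs duration → Spec_mix_tape songs duration (mix_tape songs duration)

-- ===== LEMMAS AND PROOFS =====

-- feasibility: d is a subset sum of R and is nonnegative
def Feasible (R : List (String × Int)) (d : Int) : Prop :=
  0 ≤ d ∧ ∃ T : List (String × Int), T.Sublist R ∧ (T.map Prod.snd).sum = d

theorem negSum_cons (p : String × Int) (l : List (String × Int)) :
    negSum (p :: l) = if p.2 < 0 then p.2 + negSum l else negSum l := by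
  simp only [negSum, List.filter_cons]
  split <;> simp_all

theorem posSum_cons (p : String × Int) (l : List (String × Int)) :
    posSum (p :: l) = if 0 < p.2 then p.2 + posSum l else posSum l := by
  simp only [posSum, List.filter_cons]
  split <;> simp_all

theorem sum_range (T items : List (String × Int)) (h : T.Sublist items) :
    negSum items ≤ (T.map Prod.snd).sum ∧ (T.map Prod.snd).sum ≤ posSum items := by
  induction h with
  | slnil => simp [negSum, posSum]
  | @cons l₁ l₂ a _ ih =>
    rw [negSum_cons, posSum_cons]
    constructor <;> split <;> omega
  | @cons₂ l₁ l₂ a _ ih =>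
    rw [negSum_cons, posSum_cons]
    simp only [List.map_cons, List.sum_cons]
    constructor <;> split <;> omega

theorem subsetSum_iff (items : List (String × Int)) (t : Int) :
    subsetSum items t = true ↔ ∃ T : List (String × Int), T.Sublist items ∧ (T.map Prod.snd).sum = t := by
  suffices H : ∀ (items : List (String × Int)) (t : Int),
      canSum items t (negSum items) (posSum items) = true ↔
        ∃ T : List (String × Int), T.Sublist items ∧ (T.map Prod.snd).sum = t from H items t
  intro items
  induction items with
  | nil =>
    intro t
    by_cases h0 : t = 0
    · subst h0
      simp only [canSum, if_pos rfl]
      exact ⟨fun _ => ⟨[], List.nil_sublist _, rfl⟩, fun _ => rfl⟩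
    · simp only [canSum, if_neg h0]
      constructor
      · intro h; simp at h
      · rintro ⟨T, hT, hsum⟩
        rw [List.sublist_nil.1 hT] at hsum
        simp at hsum; omega
  | cons p rest ih =>
    intro t
    by_cases h0 : t = 0
    · subst h0
      simp only [canSum, if_pos rfl]
      exact ⟨fun _ => ⟨[], List.nil_sublist _, rfl⟩, fun _ => rfl⟩
    · by_cases hw : t < negSum (p :: rest) ∨ posSum (p :: rest) < t
      · simp only [canSum, if_neg h0, if_pos hw]
        constructor
        · intro h; simp at h
        · rintro ⟨T, hT, hsum⟩
          have := sum_range T (p :: rest) hT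
          omega
      · have hlo : (if p.2 < 0 then negSum (p :: rest) - p.2 else negSum (p :: rest)) = negSum rest := by
          rw [negSum_cons]; split <;> omega
        have hhi : (if 0 < p.2 then posSum (p :: rest) - p.2 else posSum (p :: rest)) = posSum rest := by
          rw [posSum_cons]; split <;> omega
        have e : canSum (p :: rest) t (negSum (p :: rest)) (posSum (p :: rest)) =
            (canSum rest (t - p.2) (negSum rest) (posSum rest)
              || canSum rest t (negSum rest) (posSum rest)) := by
          conv_lhs => rw [canSum]
          rw [if_neg h0, if_neg hw, hlo, hhi]
        rw [e, Bool.or_eq_true, ih, ih]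
        constructor
        · rintro (⟨T, hT, hs⟩ | ⟨T, hT, hs⟩)
          · exact ⟨p :: T, List.Sublist.cons₂ p hT, by simp only [List.map_cons, List.sum_cons]; omega⟩
          · exact ⟨T, hT.cons p, hs⟩
        · rintro ⟨T, hT, hs⟩
          rcases List.sublist_cons_iff.1 hT with h | ⟨r, rfl, hr⟩
          · exact Or.inr ⟨T, h, hs⟩
          · refine Or.inl ⟨r, hr, ?_⟩
            simp only [List.map_cons, List.sum_cons] at hs
            omega

-- with nodup keys, filtering out x's key from l₁ ++ x :: l₂ yields l₁ ++ l₂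
theorem pyFilterNe_decomp (l₁ l₂ : List (String × Int)) (x : String × Int)
    (h : ((l₁ ++ x :: l₂).map Prod.fst).Nodup) :
    pyFilterNe (l₁ ++ x :: l₂) x.1 = l₁ ++ l₂ := by
  have h2 : (List.map Prod.fst l₁ ++ x.1 :: List.map Prod.fst l₂).Nodup := by simpa using h
  rcases List.nodup_append.1 h2 with ⟨hn₁, hn₂, hdisj⟩
  have hx1 : ∀ p ∈ l₁, p.1 ≠ x.1 := fun p hp =>
    hdisj p.1 (List.mem_map.2 ⟨p, hp, rfl⟩) x.1 List.mem_cons_self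
  have hx2 : ∀ p ∈ l₂, p.1 ≠ x.1 := fun p hp he =>
    (List.nodup_cons.1 hn₂).1 (by rw [← he]; exact List.mem_map.2 ⟨p, hp, rfl⟩)
  unfold pyFilterNe
  rw [List.filter_append, List.filter_cons]
  simp only [bne_self_eq_false, Bool.false_eq_true, reduceIte]
  rw [List.filter_eq_self.2 (fun p hp => bne_iff_ne.2 (hx1 p hp)),
      List.filter_eq_self.2 (fun p hp => bne_iff_ne.2 (hx2 p hp))]

theorem tryA_eq_none_iff (f : Nat) (songs : List (String × Int)) (d : Int) :
    ∀ pending, tryA f songs pending d = none ↔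
      ∀ x ∈ pending, mixA f (pyFilterNe songs x.1) (d - x.2) = none := by
  intro pending
  induction pending with
  | nil => simp [tryA]
  | cons x rest ih =>
    unfold tryA
    cases hx : mixA f (pyFilterNe songs x.1) (d - x.2) with
    | some r => simp [hx]
    | none =>
      simp only [ih]
      constructor
      · intro h y hy
        rcases List.mem_cons.1 hy with rfl | hy'
        · exact hx
        · exact h y hy'
      · intro h y hy
        exact h y (List.mem_cons_of_mem _ hy)

theorem mixA_isSome :
    ∀ (f : Nat) (R : List (String × Int)) (d : Int), R.length < f →
      ((R.map Prod.fst).Nodup) → ((mixA f R d).isSome ↔ Feasible R d) := by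
  intro f
  induction f with
  | zero => intro R d h; omega
  | succ f ih =>
    intro R d hlen hnd
    by_cases h0 : d = 0
    · subst h0
      simp only [mixA, if_pos rfl, Option.isSome_some]
      constructor
      · intro _; exact ⟨le_refl 0, [], List.nil_sublist R, rfl⟩
      · intro _; trivial
    · by_cases hneg : d < 0
      · simp only [mixA, if_neg h0, if_pos hneg, Option.isSome_none]
        constructor
        · intro h; simp at h
        · rintro ⟨hd, _⟩; omega
      · have hd : 0 < d := by omega
        simp only [mixA, if_neg h0, if_neg hneg]
        constructor
        · intro hsome
          have hnn : ¬ (tryA f R R d = none) := by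
            intro hn; rw [hn] at hsome; simp at hsome
          have hex : ∃ x ∈ R, mixA f (pyFilterNe R x.1) (d - x.2) ≠ none := by
            by_contra hc
            push_neg at hc
            exact hnn ((tryA_eq_none_iff f R d R).2 hc)
          obtain ⟨x, hxR, hne⟩ := hex
          obtain ⟨l₁, l₂, rfl⟩ := List.append_of_mem hxR
          have hfilter := pyFilterNe_decomp l₁ l₂ x hnd
          have hlen2 : (l₁ ++ l₂).length < f := by
            simp only [List.length_append, List.length_cons] at hlen ⊢; omega
          have hsub : (l₁ ++ l₂).Sublist (l₁ ++ x :: l₂) :=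
            List.Sublist.append_left (List.sublist_cons_self x l₂) l₁
          have hnd2 : ((l₁ ++ l₂).map Prod.fst).Nodup :=
            List.Nodup.sublist (List.Sublist.map Prod.fst hsub) hnd
          have hrec : (mixA f (l₁ ++ l₂) (d - x.2)).isSome :=
            Option.isSome_iff_ne_none.2 (hfilter ▸ hne)
          obtain ⟨ht0, T, hT, hsum⟩ := (ih (l₁ ++ l₂) (d - x.2) hlen2 hnd2).1 hrec
          rcases List.sublist_append_iff.1 hT with ⟨T₁, T₂, rfl, h1, h2⟩
          refine ⟨by omega, T₁ ++ x :: T₂, ?_, ?_⟩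
          · exact List.Sublist.append h1 (List.Sublist.cons₂ x h2)
          · simp only [List.map_append, List.sum_append, List.map_cons, List.sum_cons] at hsum ⊢
            omega
        · rintro ⟨_, S, hS, hsum⟩
          have key : ∀ x ∈ S, 0 ≤ d - x.2 → (mixA f (pyFilterNe R x.1) (d - x.2)).isSome := by
            intro x hxS ht0
            obtain ⟨l₁, l₂, hR⟩ := List.append_of_mem (hS.subset hxS)
            subst hR
            have hfilter := pyFilterNe_decomp l₁ l₂ x hnd
            have hlen2 : (l₁ ++ l₂).length < f := by
              simp only [List.length_append, List.length_cons] at hlen ⊢; omega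
            have hsub : (l₁ ++ l₂).Sublist (l₁ ++ x :: l₂) :=
              List.Sublist.append_left (List.sublist_cons_self x l₂) l₁
            have hnd2 : ((l₁ ++ l₂).map Prod.fst).Nodup :=
              List.Nodup.sublist (List.Sublist.map Prod.fst hsub) hnd
            have hndS : (S.map Prod.fst).Nodup :=
              List.Nodup.sublist (List.Sublist.map Prod.fst hS) hnd
            obtain ⟨s₁, s₂, hSd⟩ := List.append_of_mem hxS
            subst hSd
            have hSfilter := pyFilterNe_decomp s₁ s₂ x hndS
            have hTsub : (s₁ ++ s₂).Sublist (l₁ ++ l₂) := by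
              rw [← hSfilter, ← hfilter]
              exact List.Sublist.filter _ hS
            have hTsum : ((s₁ ++ s₂).map Prod.snd).sum = d - x.2 := by
              simp only [List.map_append, List.sum_append, List.map_cons, List.sum_cons] at hsum ⊢
              omega
            rw [hfilter]
            exact (ih (l₁ ++ l₂) (d - x.2) hlen2 hnd2).2 ⟨ht0, s₁ ++ s₂, hTsub, hTsum⟩
          have keyx : ∃ x ∈ S, 0 ≤ d - x.2 := by
            by_cases hxneg : ∃ x ∈ S, x.2 ≤ 0
            · obtain ⟨x, hxS, hx2⟩ := hxneg
              exact ⟨x, hxS, by omega⟩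
            · push_neg at hxneg
              have hSne : S ≠ [] := by
                intro hnil; rw [hnil] at hsum; simp at hsum; omega
              obtain ⟨y, S', rfl⟩ := List.exists_cons_of_ne_nil hSne
              refine ⟨y, List.mem_cons_self, ?_⟩
              have htail : 0 ≤ (S'.map Prod.snd).sum := by
                apply List.sum_nonneg
                intro v hv
                obtain ⟨p, hp, rfl⟩ := List.mem_map.1 hv
                exact le_of_lt (hxneg p (List.mem_cons_of_mem _ hp))
              simp only [List.map_cons, List.sum_cons] at hsum
              omega
          obtain ⟨x, hxS, ht0⟩ := keyx
          have hx := key x hxS ht0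
          rw [Option.isSome_iff_ne_none]
          intro hn
          have := (tryA_eq_none_iff f R d R).1 hn x (hS.subset hxS)
          rw [this] at hx
          simp at hx

theorem loop_corr (f : Nat) (d : Int) (R : List (String × Int))
    (hn : (R.map Prod.fst).Nodup) (hf : R.length ≤ f) (hd : 0 < d) :
    ∀ pending before, R = before ++ pending →
      (tryA f R pending d = none ∧ findChosen d before pending = none) ∨
      (∃ nm du rest r, findChosen d before pending = some (nm, du, rest) ∧
        tryA f R pending d = some (nm :: r) ∧ mixA f rest (d - du) = some r ∧
        0 ≤ d - du ∧ ∃ l₁ l₂, rest = l₁ ++ l₂ ∧ R = l₁ ++ (nm, du) :: l₂) := by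
  intro pending
  induction pending with
  | nil =>
    intro before _
    left
    exact ⟨by simp [tryA], by simp [findChosen]⟩
  | cons x rest ih =>
    intro before hR
    have hnd' : ((before ++ x :: rest).map Prod.fst).Nodup := hR ▸ hn
    have hfilter : pyFilterNe R x.1 = before ++ rest := by
      rw [hR]; exact pyFilterNe_decomp before rest x hnd'
    have hlen2 : (before ++ rest).length < f := by
      have : R.length = before.length + rest.length + 1 := by
        rw [hR]; simp only [List.length_append, List.length_cons]; omega
      simp only [List.length_append]; omega
    have hsub : (before ++ rest).Sublist (before ++ x :: rest) :=
      List.Sublist.append_left (List.sublist_cons_self x rest) before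
    have hnd2 : ((before ++ rest).map Prod.fst).Nodup :=
      List.Nodup.sublist (List.Sublist.map Prod.fst hsub) hnd'
    have hiff := mixA_isSome f (before ++ rest) (d - x.2) hlen2 hnd2
    by_cases hc : 0 ≤ d - x.2 ∧ subsetSum (before ++ rest) (d - x.2) = true
    · have hfeas : Feasible (before ++ rest) (d - x.2) := ⟨hc.1, (subsetSum_iff _ _).1 hc.2⟩
      obtain ⟨r, hr⟩ := Option.isSome_iff_exists.1 (hiff.2 hfeas)
      right
      refine ⟨x.1, x.2, before ++ rest, r, ?_, ?_, hr, hc.1, before, rest, rfl, by rw [hR]⟩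
      · simp only [findChosen, if_pos hc]
      · simp only [tryA, hfilter, hr]
    · have hnone : mixA f (before ++ rest) (d - x.2) = none := by
        cases hM : mixA f (before ++ rest) (d - x.2) with
        | none => rfl
        | some r =>
          exfalso
          obtain ⟨h1, T, hT, hs⟩ := hiff.1 (by rw [hM]; rfl)
          exact hc ⟨h1, (subsetSum_iff _ _).2 ⟨T, hT, hs⟩⟩
      have e1 : tryA f R (x :: rest) d = tryA f R rest d := by
        simp only [tryA, hfilter, hnone]
      have e2 : findChosen d before (x :: rest) = findChosen d (before ++ [x]) rest := by
        simp only [findChosen, if_neg hc]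
      rw [e1, e2]
      exact ih (before ++ [x]) (by rw [hR]; simp)

theorem mixLoop_eq :
    ∀ (R : List (String × Int)) (d : Int) (acc : List String) (f : Nat),
      R.length < f → ((R.map Prod.fst).Nodup) → 0 ≤ d →
      mixLoop R d acc = (mixA f R d).map (fun r => acc ++ r) := by
  suffices H : ∀ (n : Nat) (R : List (String × Int)) (d : Int) (acc : List String) (f : Nat),
      R.length = n → R.length < f → ((R.map Prod.fst).Nodup) → 0 ≤ d →
      mixLoop R d acc = (mixA f R d).map (fun r => acc ++ r) by
    intro R d acc f hf hnd hd
    exact H R.length R d acc f rfl hf hnd hd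
  intro n
  induction n using Nat.strong_induction_on with
  | _ n ih =>
    intro R d acc f hlen hf hnd hd0
    obtain ⟨f', rfl⟩ : ∃ f'', f = f'' + 1 := ⟨f - 1, by omega⟩
    by_cases h0 : d = 0
    · subst h0
      rw [mixLoop, if_pos rfl]
      simp [mixA]
    · have hd : 0 < d := by omega
      have hmA : mixA (f' + 1) R d = tryA f' R R d := by
        simp only [mixA, if_neg h0, if_neg (by omega : ¬ d < 0)]
      rw [mixLoop, if_neg h0]
      rcases loop_corr f' d R hnd (by omega) hd R [] (by simp) with
        ⟨h1, h2⟩ | ⟨nm, du, rest, r, hfc, htry, hrec, hdu, l₁, l₂, hrest, hRd⟩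
      · split
        · rw [hmA, h1]; rfl
        · next _ _ _ heq => rw [h2] at heq; cases heq
      · split
        · next heq => rw [hfc] at heq; cases heq
        · next nm' du' rest' heq =>
          rw [hfc] at heq
          simp only [Option.some.injEq, Prod.mk.injEq] at heq
          obtain ⟨rfl, rfl, rfl⟩ := heq
          have hrl : rest.length + 1 = R.length := by
            rw [hrest, hRd]; simp only [List.length_append, List.length_cons]; omega
          have hsubr : rest.Sublist R := by
            rw [hrest, hRd]
            exact List.Sublist.append_left (List.sublist_cons_self _ l₂) l₁
          have hndr : (rest.map Prod.fst).Nodup :=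
            List.Nodup.sublist (List.Sublist.map Prod.fst hsubr) hnd
          rw [ih rest.length (by omega) rest (d - du) (acc ++ [nm]) f' rfl (by omega) hndr hdu,
            hmA, htry, hrec]
          simp

-- ===== VERDICT (by name: the statement is the Claim_ definition above) =====
theorem mix_tape_spec : Claim_equal_mix_tape := by
  intro songs duration _ hpre
  unfold Spec_mix_tape mix_tape mix_tape_alt
  by_cases hneg : duration < 0
  · rw [if_pos hneg]
    unfold mixA
    rw [if_neg (by omega), if_pos hneg]
  · rw [if_neg hneg]
    rw [mixLoop_eq songs duration [] (songs.length + 1) (by omega) hpre (by omega)]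
    cases mixA (songs.length + 1) songs duration <;> simp
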